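-- pv_equiv track=rewrite | github.com/blu3r4y/ccc-linz-nov2022 | ccc/salesman.py | _node_list_to_directions
-- ===== SOURCE A (Python) =====
-- def _node_list_to_directions(nodes):
--     result = []
--
--     cur = nodes[0]
--     for i in range(1, len(nodes)):
--         nxt = nodes[i]
--
--         # check for nop
--         if cur[0] == nxt[0] and cur[1] == nxt[1]:
--             continue
--
--         if cur[0] == nxt[0]:
--             if cur[1] < nxt[1]:
--                 result.append("R")
--             else:
--                 result.append("L")
--         elif cur[1] == nxt[1]:
--             if cur[0] < nxt[0]:
--                 result.append("D")
--             else: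
--                 result.append("U")
--         else:
--             raise ValueError(f"invalid diagonal move")
--
--         cur = nxt
--
--     return result
-- ===== SOURCE B (Python) =====
-- def _node_list_to_directions(nodes):
--     # stage 1: drop consecutive duplicate nodes
--     path = nodes[:1] + [b for a, b in zip(nodes, nodes[1:]) if b != a]
--     # stage 2: validate that every remaining step is axis-aligned
--     if any(ax != bx and ay != by for (ax, ay), (bx, by) in zip(path, path[1:])):
--         raise ValueError("invalid diagonal move")
--     # stage 3: one letter per step, selected arithmetically
--     return ["RLDU"[2 * (bx != ax) + (ax + ay > bx + by)]
--             for (ax, ay), (bx, by) in zip(path, path[1:])]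
-- ===== Notes on version B (the rewrite author's own statement) =====
-- stated objective: alternative
-- what changed: Replaced A's single stateful index loop (mutable cur, skip-continue, four-way if/elif cascade) by a two-stage pipeline: first compress consecutive duplicate nodes, then map each adjacent pair of the compressed path to its letter by an arithmetic index into the string "RLDU".
-- outside the precondition, e.g. on _node_list_to_directions([]): A raises IndexError, B returns []
import Mathlib
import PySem

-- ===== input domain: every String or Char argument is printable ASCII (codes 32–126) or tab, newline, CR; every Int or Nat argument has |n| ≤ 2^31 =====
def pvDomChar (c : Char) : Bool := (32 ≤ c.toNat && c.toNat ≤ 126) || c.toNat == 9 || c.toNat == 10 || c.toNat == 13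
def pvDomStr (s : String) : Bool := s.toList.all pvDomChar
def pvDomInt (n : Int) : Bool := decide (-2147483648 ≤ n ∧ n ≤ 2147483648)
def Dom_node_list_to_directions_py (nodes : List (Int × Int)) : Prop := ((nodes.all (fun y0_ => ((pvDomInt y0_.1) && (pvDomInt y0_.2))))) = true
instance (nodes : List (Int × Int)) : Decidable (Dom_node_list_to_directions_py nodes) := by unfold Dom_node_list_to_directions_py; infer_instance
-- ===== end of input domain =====

-- B replaces A's stateful index loop (mutable cur, skip, if/elif cascade) by a two-stage
-- pipeline: compress consecutive duplicates, then map each remaining step to a letter by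
-- an arithmetic index into "RLDU" (objective: alternative).

-- ===== PORT A =====
-- the for-loop of A: state is (cur, result); the final `else` branch is Python's
-- `raise ValueError` (excluded by Pre_), where the port stops and returns result
def aLoop : List (Int × Int) → (Int × Int) → List String → List String
  | [], _, res => res
  | nxt :: rest, cur, res =>
    if cur.1 = nxt.1 ∧ cur.2 = nxt.2 then aLoop rest cur res
    else if cur.1 = nxt.1 then
      (if cur.2 < nxt.2 then aLoop rest nxt (res ++ ["R"]) else aLoop rest nxt (res ++ ["L"]))
    else if cur.2 = nxt.2 then
      (if cur.1 < nxt.1 then aLoop rest nxt (res ++ ["D"]) else aLoop rest nxt (res ++ ["U"]))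
    else res

def node_list_to_directions_py (nodes : List (Int × Int)) : List String :=
  match nodes with
  | [] => []                       -- nodes[0] raises IndexError here; excluded by Pre_
  | cur :: rest => aLoop rest cur []

-- ===== PORT B =====
-- stage 2's `raise ValueError` is ported as returning [] (those inputs are outside Pre_);
-- "RLDU"[idx] yields a one-char string, ported as Str.pyGet? mapped through Char.toString
-- (idx is 0..3 whenever the expression is evaluated, so the getD "" default is never used)
def node_list_to_directions_py_alt (nodes : List (Int × Int)) : List String :=
  let path := PySem.List.slice nodes none (some 1) ++
    ((nodes.zip (PySem.List.slice nodes (some 1) none)).filter (fun p => !(p.2 == p.1))).map Prod.snd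
  if (path.zip (PySem.List.slice path (some 1) none)).any
      (fun p => !(p.1.1 == p.2.1) && !(p.1.2 == p.2.2)) then []
  else
    (path.zip (PySem.List.slice path (some 1) none)).map (fun p =>
      ((PySem.Str.pyGet? "RLDU"
          (2 * (if p.2.1 == p.1.1 then 0 else 1) +
           (if p.1.1 + p.1.2 > p.2.1 + p.2.2 then 1 else 0))).map Char.toString).getD "")

-- ===== PRECONDITION & SPEC =====
-- every consecutive pair shares a coordinate (no diagonal step)
def chainOK (xs : List (Int × Int)) : Prop :=
  ∀ p ∈ xs.zip xs.tail, p.1.1 = p.2.1 ∨ p.1.2 = p.2.2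

-- A raises IndexError on [] and ValueError on a diagonal move; both are outside Pre_
def Pre_node_list_to_directions_py (nodes : List (Int × Int)) : Prop :=
  nodes ≠ [] ∧ chainOK nodes

instance (nodes : List (Int × Int)) : Decidable (Pre_node_list_to_directions_py nodes) := by
  unfold Pre_node_list_to_directions_py chainOK; infer_instance

def pvWitness_node_list_to_directions_py : (List (Int × Int)) := [(0, 0), (0, 2), (1, 2), (1, 2)]

def Spec_node_list_to_directions_py (nodes : List (Int × Int)) (out : List String) : Prop := out = node_list_to_directions_py_alt nodes
instance (nodes : List (Int × Int)) (out : List String) : Decidable (Spec_node_list_to_directions_py nodes out) := by unfold Spec_node_list_to_directions_py; infer_instance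

-- ===== CLAIM =====
def Claim_equal_node_list_to_directions_py : Prop := ∀ (nodes : List (Int × Int)), Dom_node_list_to_directions_py nodes → Pre_node_list_to_directions_py nodes → Spec_node_list_to_directions_py nodes (node_list_to_directions_py nodes)

-- ===== LEMMAS AND PROOFS =====

-- B's letter for one step
def letterFn (p : (Int × Int) × (Int × Int)) : String :=
  ((PySem.Str.pyGet? "RLDU"
      (2 * (if p.2.1 == p.1.1 then 0 else 1) +
       (if p.1.1 + p.1.2 > p.2.1 + p.2.2 then 1 else 0))).map Char.toString).getD ""

-- B's stage-1 output on a nonempty list, and stage 2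
def pathOf (cur : Int × Int) (rest : List (Int × Int)) : List (Int × Int) :=
  cur :: (((cur :: rest).zip rest).filter (fun p => !(p.2 == p.1))).map Prod.snd

def letters (xs : List (Int × Int)) : List String :=
  (xs.zip xs.tail).map letterFn

-- consecutive pairs of the compressed path are still axis-aligned
theorem chainOK_pathOf (rest : List (Int × Int)) : ∀ (cur : Int × Int),
    chainOK (cur :: rest) → chainOK (pathOf cur rest) := by
  induction rest with
  | nil => intro cur _ p hp; simp [pathOf] at hp
  | cons n rs ih =>
    intro cur hchain
    have hpair : cur.1 = n.1 ∨ cur.2 = n.2 := by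
      have := hchain (cur, n) (by simp)
      simpa using this
    have htail : chainOK (n :: rs) := by
      intro p hp
      exact hchain p (by simp [List.zip]; right; simpa [List.zip] using hp)
    by_cases hnop : cur = n
    · have hp : pathOf cur (n :: rs) = pathOf n rs := by simp [pathOf, hnop]
      rw [hp]; exact ih n htail
    · have hne : ¬ (n == cur) = true := fun h => hnop (eq_of_beq h).symm
      have hp : pathOf cur (n :: rs) = cur :: pathOf n rs := by simp [pathOf, hne]
      rw [hp]
      intro p hp'
      have hzip : (cur :: pathOf n rs).zip (cur :: pathOf n rs).tail
          = (cur, n) :: ((pathOf n rs).zip (pathOf n rs).tail) := rfl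
      rw [hzip] at hp'
      rcases List.mem_cons.mp hp' with h | h
      · rw [h]; exact hpair
      · exact ih n htail p h

theorem alt_eq_letters (cur : Int × Int) (rest : List (Int × Int))
    (hchain : chainOK (cur :: rest)) :
    node_list_to_directions_py_alt (cur :: rest) = letters (pathOf cur rest) := by
  have h1 : PySem.List.slice (cur :: rest) none (some 1) = [cur] := by
    have : ((1:Nat):Int) = (1:Int) := rfl
    rw [← this, PySem.List.slice_to_natCast]; rfl
  have hok := chainOK_pathOf rest cur hchain
  have hany : ((pathOf cur rest).zip (pathOf cur rest).tail).any
      (fun p => !(p.1.1 == p.2.1) && !(p.1.2 == p.2.2)) = false := by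
    rw [List.any_eq_false]
    intro p hp
    rcases hok p hp with h | h <;> simp [h]
  simp only [node_list_to_directions_py_alt, PySem.List.slice_from_one, h1,
    List.tail_cons, List.singleton_append]
  have hpath : pathOf cur rest
      = cur :: (((cur :: rest).zip rest).filter (fun p => !(p.2 == p.1))).map Prod.snd := rfl
  rw [← hpath,
    show (((cur :: rest).zip rest).filter (fun p => !(p.2 == p.1))).map Prod.snd
      = (pathOf cur rest).tail from rfl, hany]
  simp [letters, letterFn]

theorem aLoop_eq (rest : List (Int × Int)) : ∀ (cur : Int × Int) (res : List String),
    chainOK (cur :: rest) → aLoop rest cur res = res ++ letters (pathOf cur rest) := by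
  induction rest with
  | nil => intro cur res _; simp [aLoop, letters, pathOf]
  | cons n rs ih =>
    intro cur res hchain
    have hpair : cur.1 = n.1 ∨ cur.2 = n.2 := by
      have := hchain (cur, n) (by simp)
      simpa using this
    have htail : chainOK (n :: rs) := by
      intro p hp
      exact hchain p (by simp [List.zip]; right; simpa [List.zip] using hp)
    by_cases hnop : cur.1 = n.1 ∧ cur.2 = n.2
    · have hcn : cur = n := Prod.ext hnop.1 hnop.2
      have hp : pathOf cur (n :: rs) = pathOf n rs := by
        simp [pathOf, hcn]
      rw [hp]
      simp only [aLoop, if_pos hnop]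
      rw [hcn]
      exact ih n res htail
    · have hne : ¬ (n == cur) = true := by
        intro h
        have h' : n = cur := eq_of_beq h
        exact hnop ⟨by rw [h'], by rw [h']⟩
      have hp : pathOf cur (n :: rs) = cur :: pathOf n rs := by
        simp [pathOf, hne]
      have hl : letters (pathOf cur (n :: rs)) = letterFn (cur, n) :: letters (pathOf n rs) := by
        rw [hp]; simp [letters, pathOf]
      rw [hl]
      simp only [aLoop, if_neg hnop]
      rcases hpair with hx | hy
      · have hy' : cur.2 ≠ n.2 := fun h => hnop ⟨hx, h⟩
        rw [if_pos hx]
        by_cases hlt : cur.2 < n.2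
        · rw [if_pos hlt, ih n (res ++ ["R"]) htail]
          have : letterFn (cur, n) = "R" := by
            simp only [letterFn]
            have h1 : (n.1 == cur.1) = true := by simp [hx]
            have h2 : ¬ cur.1 + cur.2 > n.1 + n.2 := by omega
            simp [h1, h2]; decide
          rw [this]; simp
        · have hgt : n.2 < cur.2 := by omega
          rw [if_neg hlt, ih n (res ++ ["L"]) htail]
          have : letterFn (cur, n) = "L" := by
            simp only [letterFn]
            have h1 : (n.1 == cur.1) = true := by simp [hx]
            have h2 : cur.1 + cur.2 > n.1 + n.2 := by omega
            simp [h1, h2]; decide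
          rw [this]; simp
      · have hx' : cur.1 ≠ n.1 := fun h => hnop ⟨h, hy⟩
        rw [if_neg hx', if_pos hy]
        by_cases hlt : cur.1 < n.1
        · rw [if_pos hlt, ih n (res ++ ["D"]) htail]
          have : letterFn (cur, n) = "D" := by
            simp only [letterFn]
            have h1 : ¬ (n.1 == cur.1) = true := by simp; omega
            have h2 : ¬ cur.1 + cur.2 > n.1 + n.2 := by omega
            simp [h1, h2]; decide
          rw [this]; simp
        · have hgt : n.1 < cur.1 := by omega
          rw [if_neg hlt, ih n (res ++ ["U"]) htail]
          have : letterFn (cur, n) = "U" := by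
            simp only [letterFn]
            have h1 : ¬ (n.1 == cur.1) = true := by simp; omega
            have h2 : cur.1 + cur.2 > n.1 + n.2 := by omega
            simp [h1, h2]; decide
          rw [this]; simp

-- ===== VERDICT =====
theorem node_list_to_directions_py_spec : Claim_equal_node_list_to_directions_py := by
  intro nodes _ hpre
  unfold Spec_node_list_to_directions_py
  match nodes, hpre with
  | [], ⟨h, _⟩ => exact absurd rfl h
  | cur :: rest, ⟨_, hchain⟩ =>
    rw [alt_eq_letters cur rest hchain]
    simpa [node_list_to_directions_py] using aLoop_eq rest cur [] hchain
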